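-- pv_equiv track=rewrite | github.com/OleksandraFilistovich/EPAM_2021_PY_Homework | 1.Introduction_to_Python/task_1_ex_3.py | correct_formula
-- ===== SOURCE A (Python) =====
-- def correct_characters(input_str):
--     if input_str == '':
--         return False
--     return all([ch in '0123456789+-' for ch in input_str])
--
-- def replace_digits(input_str):
--     result_str = ''
--     for ch in input_str:
--         if ch.isdigit():
--             result_str += ','
--         else:
--             result_str += ch
--     return result_str
--
-- def correct_formula(input_str):
--     if not correct_characters(input_str):
--         return False
--     elif not input_str[0].isdigit() \
--             or not input_str[-1].isdigit():
--         return False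
--     result_str = replace_digits(input_str)
--     if any([len(block) > 1 for block in result_str.split(',')]):
--         return False
--     return True
-- ===== SOURCE B (Python) =====
-- def correct_formula(input_str):
--     if not input_str:
--         return False
--     if not input_str[0].isdigit() or not input_str[-1].isdigit():
--         return False
--     prev = ' '
--     for ch in input_str:
--         if ch not in '0123456789+-':
--             return False
--         if ch in '+-' and prev in '+-':
--             return False
--         prev = ch
--     return True
-- ===== Notes on version B (the rewrite author's own statement) =====
-- stated objective: faster
-- what changed: A validates by building a copy of the string with every digit replaced by a comma, splitting that string on commas and checking every block has length <= 1; B is a single scan that tracks only the previous character and rejects early on a foreign character or two adjacent operators, after guarding that the string is nonempty and starts and ends with a digit.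
import Mathlib
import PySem

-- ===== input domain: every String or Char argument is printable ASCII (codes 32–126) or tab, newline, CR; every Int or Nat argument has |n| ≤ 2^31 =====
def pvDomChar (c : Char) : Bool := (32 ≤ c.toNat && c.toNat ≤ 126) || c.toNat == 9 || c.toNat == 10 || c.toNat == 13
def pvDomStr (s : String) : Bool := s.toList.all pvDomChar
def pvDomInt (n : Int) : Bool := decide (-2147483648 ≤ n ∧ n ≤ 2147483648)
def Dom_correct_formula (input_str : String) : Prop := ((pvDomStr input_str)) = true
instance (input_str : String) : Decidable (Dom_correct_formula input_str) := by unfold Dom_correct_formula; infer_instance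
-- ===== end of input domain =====

-- B replaces A's transform/split/measure pipeline (replace digits by commas, split on commas,
-- measure the blocks) with a single early-exit scan tracking the previous character; objective: faster.

-- the character-set literal '0123456789+-' from the Python, as a char list
def pyDigitsOps : List Char := ['0','1','2','3','4','5','6','7','8','9','+','-']

-- ===== PORT A =====
def correct_characters (s : List Char) : Bool :=
  if s = [] then false
  else (s.map (fun ch => pyDigitsOps.contains ch)).all (fun x => x)

def replace_digits (s : List Char) : List Char :=
  s.foldl (fun result_str ch => result_str ++ [if PySem.Chars.isdigit ch then ',' else ch]) []

def correct_formula (input_str : String) : Bool :=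
  if !(correct_characters input_str.toList) then false
  else
    match PySem.List.pyGet? input_str.toList 0, PySem.List.pyGet? input_str.toList (-1) with
    | some c0, some cl =>
        if !(PySem.Chars.isdigit c0) || !(PySem.Chars.isdigit cl) then false
        else
          let result_str := replace_digits input_str.toList
          if ((PySem.Chars.splitOn result_str [',']).map
                (fun block => decide (1 < block.length))).any (fun x => x) then false
          else true
    | _, _ => false  -- unreachable: correct_characters guarantees a nonempty string

-- ===== PORT B =====
-- B's own character-set literals '0123456789+-' and '+-'
def bDigitsOps : List Char := ['0','1','2','3','4','5','6','7','8','9','+','-']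
def bOps : List Char := ['+','-']

def altLoop (prev : Char) : List Char → Bool
  | [] => true
  | ch :: rest =>
      if !(bDigitsOps.contains ch) then false
      else if (bOps.contains ch && bOps.contains prev) then false
      else altLoop ch rest

def correct_formula_alt (input_str : String) : Bool :=
  match input_str.toList with
  | [] => false  -- 'if not input_str'
  | c :: rest =>  -- input_str[0] is c, input_str[-1] is the last element
      if !(PySem.Chars.isdigit c) || !(PySem.Chars.isdigit (rest.getLastD c)) then false
      else altLoop ' ' (c :: rest)

-- ===== PRECONDITION & SPEC =====
def Spec_correct_formula (input_str : String) (out : Bool) : Prop := out = correct_formula_alt input_str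
instance (input_str : String) (out : Bool) : Decidable (Spec_correct_formula input_str out) := by unfold Spec_correct_formula; infer_instance

-- ===== CLAIM (what is proved, stated in full; the proofs are below) =====
def Claim_equal_correct_formula : Prop := ∀ (input_str : String), Dom_correct_formula input_str → Spec_correct_formula input_str (correct_formula input_str)

-- ===== LEMMAS AND PROOFS =====

-- proof-only helper: blocksOK n l = "every comma-separated block of l has length ≤ 1",
-- the current (unfinished) block already holding n characters
def blocksOK : Nat → List Char → Bool
  | n, [] => decide (n ≤ 1)
  | n, c :: rest => if c = ',' then (decide (n ≤ 1)) && blocksOK 0 rest else blocksOK (n + 1) rest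

theorem not_le_one (n : Nat) : (!decide (n ≤ 1)) = decide (1 < n) := by
  by_cases h : n ≤ 1 <;> simp [h] <;> omega

theorem blocksOK_ge2 (l : List Char) : ∀ n, 2 ≤ n → blocksOK n l = false := by
  induction l with
  | nil => intro n hn; simp [blocksOK]; omega
  | cons c rest ih =>
      intro n hn
      by_cases hc : c = ','
      · simp [blocksOK, hc]; omega
      · simp [blocksOK, hc]; exact ih (n + 1) (by omega)

theorem go_any (l : List Char) : ∀ (fuel : Nat) (cur : List Char) (acc : List (List Char)),
    l.length ≤ fuel →
    (PySem.Chars.splitOn.go [','] fuel l cur acc).any (fun b => decide (1 < b.length)) =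
      (acc.any (fun b => decide (1 < b.length)) || !blocksOK cur.length l) := by
  induction l with
  | nil =>
      intro fuel cur acc _
      cases fuel with
      | zero =>
          rw [PySem.Chars.splitOn.go]
          simp [blocksOK, List.any_reverse, not_le_one, Bool.or_comm]
      | succ f =>
          rw [PySem.Chars.splitOn.go]
          simp [blocksOK, List.any_reverse, not_le_one, Bool.or_comm]
          omega
  | cons c rest ih =>
      intro fuel cur acc hfuel
      cases fuel with
      | zero => simp at hfuel
      | succ f =>
          have hf : rest.length ≤ f := by simp at hfuel; omega
          by_cases hc : c = ','
          · subst hc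
            have hstep : PySem.Chars.splitOn.go [','] (f + 1) (',' :: rest) cur acc =
                PySem.Chars.splitOn.go [','] f rest [] (cur.reverse :: acc) := by
              rw [PySem.Chars.splitOn.go]
              simp [List.isPrefixOf, List.drop]
            rw [hstep, ih f [] (cur.reverse :: acc) hf]
            simp only [blocksOK, if_pos rfl, List.any_cons, List.length_reverse,
              List.length_nil, Bool.not_and, not_le_one]
            simp [not_le_one, Bool.or_comm, Bool.or_left_comm, Bool.or_assoc]
          · have hstep : PySem.Chars.splitOn.go [','] (f + 1) (c :: rest) cur acc =
                PySem.Chars.splitOn.go [','] f rest (c :: cur) acc := by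
              rw [PySem.Chars.splitOn.go]
              have : [','].isPrefixOf (c :: rest) = false := by
                simp [List.isPrefixOf]
                exact Ne.symm hc
              simp [this]
            rw [hstep, ih f (c :: cur) acc hf]
            simp [blocksOK, hc]

theorem op_not_digit (c : Char) (h : PySem.Chars.isdigit c = true) :
    ¬ c ∈ bOps := by
  simp only [bOps, List.mem_cons, List.not_mem_nil, or_false]
  rintro (rfl | rfl) <;> exact absurd h (by decide)

theorem mem_S_not_digit (c : Char) (hS : c ∈ bDigitsOps)
    (h : PySem.Chars.isdigit c = false) :
    c ∈ bOps ∧ c ≠ ',' := by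
  fin_cases hS <;> first
    | exact absurd h (by decide)
    | exact ⟨by decide, by decide⟩

theorem altLoop_bad (l : List Char) : ∀ prev,
    l.all (fun ch => bDigitsOps.contains ch) = false → altLoop prev l = false := by
  induction l with
  | nil => intro prev h; simp at h
  | cons c rest ih =>
      intro prev h
      by_cases hc : c ∈ bDigitsOps
      · have hrest : rest.all (fun ch => bDigitsOps.contains ch) = false := by
          simp only [List.all_cons, Bool.and_eq_false_iff] at h
          rcases h with h | h
          · simp [hc] at h
          · exact h
        by_cases hop : c ∈ bOps ∧ prev ∈ bOps
        · simp [altLoop, hc, hop.1, hop.2]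
        · rw [Decidable.not_and_iff_not_or_not] at hop
          rcases hop with hop | hop <;> simp [altLoop, hc, hop, ih c hrest]
      · simp [altLoop, hc]

theorem blocksOK_two_false (c : Char) (l : List Char) (hnc : c ≠ ',') :
    blocksOK 1 (c :: l) = false := by
  rw [show blocksOK 1 (c :: l) = blocksOK 2 l from by simp [blocksOK, hnc]]
  exact blocksOK_ge2 l 2 le_rfl

theorem altLoop_eq_blocksOK (l : List Char) :
    ∀ prev, l.all (fun ch => bDigitsOps.contains ch) = true →
    altLoop prev l =
      blocksOK (if prev ∈ bOps then 1 else 0)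
        (l.map (fun ch => if PySem.Chars.isdigit ch then ',' else ch)) := by
  induction l with
  | nil => intro prev _; split <;> simp [altLoop, blocksOK]
  | cons c rest ih =>
      intro prev hall
      simp only [List.all_cons, Bool.and_eq_true, List.contains_eq_mem,
        decide_eq_true_eq] at hall
      obtain ⟨hc, hrest⟩ := hall
      have hrest' : rest.all (fun ch => bDigitsOps.contains ch) = true := by
        simpa [List.all_eq_true] using hrest
      by_cases hd : PySem.Chars.isdigit c = true
      · have hop := op_not_digit c hd
        rw [show altLoop prev (c :: rest) = altLoop c rest from by simp [altLoop, hc, hop]]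
        rw [ih c hrest', List.map_cons, if_pos hd]
        rw [show blocksOK (if prev ∈ bOps then 1 else 0)
              (',' :: rest.map (fun ch => if PySem.Chars.isdigit ch then ',' else ch)) =
            blocksOK 0 (rest.map (fun ch => if PySem.Chars.isdigit ch then ',' else ch)) from by
          split <;> simp [blocksOK]]
        simp [hop]
      · have hd' : PySem.Chars.isdigit c = false := by simpa using hd
        obtain ⟨hop, hnc⟩ := mem_S_not_digit c hc hd'
        rw [List.map_cons, if_neg hd]
        by_cases hp : prev ∈ bOps
        · rw [show altLoop prev (c :: rest) = false from by simp [altLoop, hc, hop, hp]]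
          rw [if_pos hp, blocksOK_two_false c _ hnc]
        · rw [show altLoop prev (c :: rest) = altLoop c rest from by simp [altLoop, hc, hop, hp]]
          rw [ih c hrest', if_neg hp, if_pos hop]
          simp [blocksOK, hnc]

theorem replace_digits_eq_map (s : List Char) :
    replace_digits s =
      s.map (fun ch => if PySem.Chars.isdigit ch then ',' else ch) := by
  have aux : ∀ (t : List Char) (acc : List Char),
      t.foldl (fun r ch => r ++ [if PySem.Chars.isdigit ch then ',' else ch]) acc =
        acc ++ t.map (fun ch => if PySem.Chars.isdigit ch then ',' else ch) := by
    intro t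
    induction t with
    | nil => simp
    | cons x xs ih => intro acc; simp [ih]
  simpa [replace_digits] using aux s []

-- ===== VERDICT (by name: the statement is the Claim_ definition above) =====
theorem correct_formula_spec : Claim_equal_correct_formula := by
  intro input_str _
  unfold Spec_correct_formula correct_formula correct_formula_alt
  cases ht : input_str.toList with
  | nil => simp [correct_characters, PySem.List.pyGet?]
  | cons c rest =>
      have h0 : PySem.List.pyGet? (c :: rest) (0 : Int) = some c :=
        PySem.List.pyGet?_zero_cons c rest
      have hcl : (c :: rest).getLast? = some (rest.getLastD c) := by
        rw [List.getLast?_cons, List.getLastD_eq_getLast?]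
      have hneg : PySem.List.pyGet? (c :: rest) (-1 : Int) = some (rest.getLastD c) := by
        rw [PySem.List.pyGet?_neg_one, hcl]
      by_cases hall : (c :: rest).all (fun ch => pyDigitsOps.contains ch) = true
      · have hcc : correct_characters (c :: rest) = true := by
          simp only [correct_characters, if_neg (List.cons_ne_nil c rest)]
          simpa [List.all_map] using hall
        simp only [hcc, Bool.not_true, Bool.false_eq_true, if_false, h0, hneg]
        by_cases hg : (!(PySem.Chars.isdigit c) || !(PySem.Chars.isdigit (rest.getLastD c))) = true
        · have hfalse : PySem.Chars.isdigit c = false ∨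
              PySem.Chars.isdigit (rest.getLast?.getD c) = false := by
            rw [List.getLastD_eq_getLast?] at hg
            simpa using hg
          rcases hfalse with h | h <;> simp [h]
        · have hg' : (!(PySem.Chars.isdigit c) || !(PySem.Chars.isdigit (rest.getLastD c))) = false := by
            simpa using hg
          simp only [hg', Bool.false_eq_true, if_false]
          rw [altLoop_eq_blocksOK (c :: rest) ' ' hall]
          rw [List.any_map]
          simp only [PySem.Chars.splitOn, Function.comp_def]
          simp only [replace_digits_eq_map]
          have hgo := go_any ((c :: rest).map (fun ch => if PySem.Chars.isdigit ch then ',' else ch))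
            (((c :: rest).map (fun ch => if PySem.Chars.isdigit ch then ',' else ch)).length + 1)
            [] [] (by omega)
          simp only [hgo, List.any_nil, Bool.false_or, List.length_nil]
          rw [if_neg (by decide : ¬ (' ' ∈ bOps))]
          cases hb : blocksOK 0 ((c :: rest).map (fun ch => if PySem.Chars.isdigit ch then ',' else ch)) <;>
            simp [hb]
      · have hall' : (c :: rest).all (fun ch => pyDigitsOps.contains ch) = false := by
          simpa using hall
        have hcc : correct_characters (c :: rest) = false := by
          simp only [correct_characters, if_neg (List.cons_ne_nil c rest)]
          simpa [List.all_map] using hall'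
        simp only [hcc, Bool.not_false, if_true, h0, hneg]
        by_cases hg : (!(PySem.Chars.isdigit c) || !(PySem.Chars.isdigit (rest.getLastD c))) = true
        · have hfalse : PySem.Chars.isdigit c = false ∨
              PySem.Chars.isdigit (rest.getLast?.getD c) = false := by
            rw [List.getLastD_eq_getLast?] at hg
            simpa using hg
          rcases hfalse with h | h <;> simp [h]
        · have hg' : (!(PySem.Chars.isdigit c) || !(PySem.Chars.isdigit (rest.getLastD c))) = false := by
            simpa using hg
          simp only [hg', Bool.false_eq_true, if_false]
          rw [altLoop_bad (c :: rest) ' ' hall']
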